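-- pv_equiv track=rewrite | github.com/puzzler7/challenges | ictf21/Abnormal/playtest.py | nora
-- ===== SOURCE A (Python) =====
-- def nor(a, b):
--     return ~(a|b)
--
-- def nora(inp):
--     assert len(inp) == 3
--     out = [None for _ in range(2)]
--     w1 = nor(inp[0], inp[1])
--     w2 = nor(inp[0], w1)
--     w3 = nor(inp[1], w1)
--     w4 = nor(w2, w3)
--     w5 = nor(w4, w4)
--     w6 = nor(w5, inp[2])
--     w7 = nor(w5, w6)
--     w8 = nor(inp[2], w6)
--     w9 = nor(w7, w8)
--     out[0] = nor(w9, w9)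
--     w10 = nor(inp[0], inp[0])
--     w11 = nor(inp[1], inp[1])
--     w12 = nor(w10, w11)
--     w13 = nor(inp[2], inp[2])
--     w14 = nor(w11, w13)
--     w15 = nor(w12, w14)
--     w16 = nor(w10, w13)
--     w17 = nor(w15, w15)
--     w18 = nor(w17, w16)
--     out[1] = nor(w18, w18)
--     return out[1], out[0]
-- ===== SOURCE B (Python) =====
-- def nora(inp):
--     assert len(inp) == 3
--     a, b, c = inp
--     return (a & b) | (a & c) | (b & c), a ^ b ^ c
-- ===== Notes on version B (the rewrite author's own statement) =====
-- stated objective: simpler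
-- what changed: Replaces the 18-gate NOR-network simulation with the closed-form full-adder formulas: carry = (a&b)|(a&c)|(b&c) and sum = a^b^c, returned in the same (carry, sum) order.
import Mathlib
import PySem

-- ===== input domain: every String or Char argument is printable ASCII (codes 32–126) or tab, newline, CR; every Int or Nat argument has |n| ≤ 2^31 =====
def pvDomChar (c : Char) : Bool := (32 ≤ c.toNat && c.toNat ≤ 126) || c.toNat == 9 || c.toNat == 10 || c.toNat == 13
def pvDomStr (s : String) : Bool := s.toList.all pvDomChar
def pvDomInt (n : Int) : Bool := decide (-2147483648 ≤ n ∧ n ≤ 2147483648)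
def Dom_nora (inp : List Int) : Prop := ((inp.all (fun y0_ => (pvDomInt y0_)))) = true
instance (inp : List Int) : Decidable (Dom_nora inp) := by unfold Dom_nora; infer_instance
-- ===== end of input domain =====

-- B replaces the 18-NOR-gate full-adder simulation by the closed-form formulas
-- carry = (a&b)|(a&c)|(b&c), sum = a^b^c (objective: simpler; same O(1) cost).

-- ===== PORT A =====
-- nor(a, b) = ~(a|b)
def norGate (a b : Int) : Int := Int.not (PySem.Int.bor a b)

-- The assert len(inp)==3 is Pre_nora; under it every index is in range, so .getD 0 is never taken.
def nora (inp : List Int) : Int × Int :=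
  let i0 := (PySem.List.pyGet? inp 0).getD 0
  let i1 := (PySem.List.pyGet? inp 1).getD 0
  let i2 := (PySem.List.pyGet? inp 2).getD 0
  let w1 := norGate i0 i1
  let w2 := norGate i0 w1
  let w3 := norGate i1 w1
  let w4 := norGate w2 w3
  let w5 := norGate w4 w4
  let w6 := norGate w5 i2
  let w7 := norGate w5 w6
  let w8 := norGate i2 w6
  let w9 := norGate w7 w8
  let out0 := norGate w9 w9
  let w10 := norGate i0 i0
  let w11 := norGate i1 i1
  let w12 := norGate w10 w11
  let w13 := norGate i2 i2
  let w14 := norGate w11 w13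
  let w15 := norGate w12 w14
  let w16 := norGate w10 w13
  let w17 := norGate w15 w15
  let w18 := norGate w17 w16
  let out1 := norGate w18 w18
  (out1, out0)

-- ===== PORT B =====
def nora_alt (inp : List Int) : Int × Int :=
  match inp with
  | [a, b, c] =>
      (PySem.Int.bor (PySem.Int.bor (PySem.Int.band a b) (PySem.Int.band a c)) (PySem.Int.band b c),
       PySem.Int.bxor (PySem.Int.bxor a b) c)
  | _ => (0, 0)   -- unreachable under Pre_nora (Python's assert raises)

-- ===== PRECONDITION & SPEC =====
-- Pre_ excludes exactly the inputs on which A's `assert len(inp) == 3` raises AssertionError.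
def Pre_nora (inp : List Int) : Prop := inp.length = 3
instance (inp : List Int) : Decidable (Pre_nora inp) := by unfold Pre_nora; infer_instance
def pvWitness_nora : List Int := [1, 1, 0]
def Spec_nora (inp : List Int) (out : Int × Int) : Prop := out = nora_alt inp
instance (inp : List Int) (out : Int × Int) : Decidable (Spec_nora inp out) := by unfold Spec_nora; infer_instance

-- ===== CLAIM (what is proved, stated in full; the proofs are below) =====
def Claim_equal_nora : Prop := ∀ (inp : List Int), Dom_nora inp → Pre_nora inp → Spec_nora inp (nora inp)

-- ===== LEMMAS AND PROOFS =====

-- subtracting a sub-mask is bitwise difference: m - (m &&& n) = Nat.ldiff m n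
theorem pv_sub_and_eq_ldiff (m : Nat) : ∀ n : Nat, m - (m &&& n) = Nat.ldiff m n := by
  induction m using Nat.binaryRec with
  | zero =>
    intro n
    have h : Nat.ldiff 0 n = 0 := by
      apply Nat.eq_of_testBit_eq
      intro i
      simp [Nat.testBit_ldiff]
    simp [h]
  | bit b m ih =>
    intro n
    rw [← Nat.bit_testBit_zero_shiftRight_one n, Nat.land_bit, Nat.ldiff_bit]
    have hle : m &&& (n >>> 1) ≤ m := Nat.and_le_left
    have := ih (n >>> 1)
    rw [Nat.bit_val, Nat.bit_val, Nat.bit_val]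
    cases b <;> cases n.testBit 0 <;> simp <;> omega

-- PySem's Python-exact bitwise ops agree with Mathlib's Int.lor/land/xor/lnot
theorem pv_bor_eq_lor (a b : Int) : PySem.Int.bor a b = Int.lor a b := by
  have hns : ∀ k : ℕ, ¬ (0:Int) ≤ Int.negSucc k := fun k => by omega
  have hts : ∀ k : ℕ, ((-(Int.negSucc k) - 1)).toNat = k := fun k => by
    have : (-(Int.negSucc k) - 1) = (k : Int) := by omega
    rw [this, Int.toNat_natCast]
  rcases a with m | m <;> rcases b with n | n <;>
    simp [PySem.Int.bor, Int.lor, hns, pv_sub_and_eq_ldiff] <;> omega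

theorem pv_band_eq_land (a b : Int) : PySem.Int.band a b = Int.land a b := by
  have hns : ∀ k : ℕ, ¬ (0:Int) ≤ Int.negSucc k := fun k => by omega
  have hts : ∀ k : ℕ, ((-(Int.negSucc k) - 1)).toNat = k := fun k => by
    have : (-(Int.negSucc k) - 1) = (k : Int) := by omega
    rw [this, Int.toNat_natCast]
  rcases a with m | m <;> rcases b with n | n <;>
    simp [PySem.Int.band, Int.land, hns, pv_sub_and_eq_ldiff] <;> omega

theorem pv_bxor_eq_xor (a b : Int) : PySem.Int.bxor a b = Int.xor a b := by
  have hns : ∀ k : ℕ, ¬ (0:Int) ≤ Int.negSucc k := fun k => by omega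
  have hts : ∀ k : ℕ, ((-(Int.negSucc k) - 1)).toNat = k := fun k => by
    have : (-(Int.negSucc k) - 1) = (k : Int) := by omega
    rw [this, Int.toNat_natCast]
  rcases a with m | m <;> rcases b with n | n <;>
    simp [PySem.Int.bxor, Int.xor, hns] <;> omega

theorem pv_not_eq_lnot (a : Int) : Int.not a = Int.lnot a := by
  rcases a with m | m <;> rfl

-- extensionality of Int by two's-complement bits
theorem pv_int_ext_testBit {a b : Int} (h : ∀ i, a.testBit i = b.testBit i) : a = b := by
  have big : ∀ m n : ℕ, m.testBit (m + n) = false := fun m n =>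
    Nat.testBit_eq_false_of_lt (lt_of_lt_of_le Nat.lt_two_pow_self
      (Nat.pow_le_pow_right (by norm_num) (Nat.le_add_right m n)))
  rcases a with m | m <;> rcases b with n | n
  · exact congrArg Int.ofNat (Nat.eq_of_testBit_eq fun i => h i)
  · exfalso
    have hn : n.testBit (m + n) = false := by rw [Nat.add_comm]; exact big n m
    have := h (m + n)
    simp [Int.testBit, big m n, hn] at this
  · exfalso
    have hn : n.testBit (m + n) = false := by rw [Nat.add_comm]; exact big n m
    have := h (m + n)
    simp [Int.testBit, big m n, hn] at this
  · refine congrArg Int.negSucc (Nat.eq_of_testBit_eq fun i => ?_)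
    have := h i
    simpa [Int.testBit] using this

-- the 18-gate NOR network computes exactly the full-adder closed forms
theorem pv_gates (a b c : Int) : nora [a, b, c] = nora_alt [a, b, c] := by
  have h0 : (PySem.List.pyGet? [a, b, c] 0).getD 0 = a := rfl
  have h1 : (PySem.List.pyGet? [a, b, c] 1).getD 0 = b := rfl
  have h2 : (PySem.List.pyGet? [a, b, c] 2).getD 0 = c := rfl
  simp only [nora, nora_alt, norGate, h0, h1, h2,
    pv_bor_eq_lor, pv_band_eq_land, pv_bxor_eq_xor, pv_not_eq_lnot]
  refine Prod.ext ?_ ?_ <;>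
  · apply pv_int_ext_testBit
    intro i
    simp only [Int.testBit_lor, Int.testBit_land, Int.testBit_lxor, Int.testBit_lnot]
    cases a.testBit i <;> cases b.testBit i <;> cases c.testBit i <;> rfl

-- ===== VERDICT (by name: the statement is the Claim_ definition above) =====
theorem nora_spec : Claim_equal_nora := by
  intro inp _ hpre
  match inp, hpre with
  | [a, b, c], _ =>
    show nora [a, b, c] = nora_alt [a, b, c]
    exact pv_gates a b c
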